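-- pv_equiv track=rewrite | github.com/sldmxm/AdventOfCode | year_2019/year_2019_day_04.py | is_number_ok_part2
-- ===== SOURCE A (Python) =====
-- def is_number_ok_part2(num: int) -> bool:
--     n = str(num)
--     repeat_counter = 1
--     has_exact_double = False
--     for i in range(1, len(n)):
--         if n[i] < n[i - 1]:
--             return False
--         elif n[i] == n[i - 1]:
--             repeat_counter += 1
--         else:
--             if repeat_counter == 2:
--                 has_exact_double = True
--             repeat_counter = 1
--     if repeat_counter == 2:
--         has_exact_double = True
--     return has_exact_double
-- ===== SOURCE B (Python) =====
-- def is_number_ok_part2(num: int) -> bool: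
--     n = str(num)
--     if any(n[i] < n[i - 1] for i in range(1, len(n))):
--         return False
--     return any(n.count(c) == 2 for c in set(n))
-- ===== Notes on version B (the rewrite author's own statement) =====
-- stated objective: simpler
-- what changed: A's single interleaved loop carrying a run counter and a seen-exact-double flag is replaced by two separate passes: a monotonicity guard scan over adjacent characters, then a count check (any distinct character of str(num) occurring exactly twice, which equals a run of exactly two once the string is known non-decreasing).
import Mathlib
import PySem

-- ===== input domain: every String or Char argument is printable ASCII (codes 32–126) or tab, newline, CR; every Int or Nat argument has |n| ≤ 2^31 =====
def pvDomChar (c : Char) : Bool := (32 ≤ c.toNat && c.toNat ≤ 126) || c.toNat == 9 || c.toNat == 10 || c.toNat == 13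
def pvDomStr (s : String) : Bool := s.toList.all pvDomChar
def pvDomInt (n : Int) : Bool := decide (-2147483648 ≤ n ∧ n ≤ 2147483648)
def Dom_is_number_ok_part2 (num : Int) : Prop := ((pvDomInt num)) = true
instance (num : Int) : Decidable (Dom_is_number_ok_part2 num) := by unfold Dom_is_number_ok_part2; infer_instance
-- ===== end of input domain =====

-- B replaces A's single interleaved run-counter loop by a monotonicity guard scan plus a
-- per-distinct-character count check (objective: simpler decomposition, same cost).

-- ===== PORT A =====
-- the for-loop over i in range(1, len(n)): walk the tail carrying the previous char,
-- repeat_counter and has_exact_double, with early return False on a descent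
def pvALoop : List Char → Char → Int → Bool → Bool
  | [], _, rc, hed => if rc == 2 then true else hed
  | c :: rest, prev, rc, hed =>
    if c < prev then false
    else if c == prev then pvALoop rest c (rc + 1) hed
    else pvALoop rest c 1 (if rc == 2 then true else hed)

def is_number_ok_part2 (num : Int) : Bool :=
  match (PySem.Int.toStr num).toList with
  | [] => if (1 : Int) == 2 then true else false
  | c :: rest => pvALoop rest c 1 false

-- ===== PORT B =====
-- any(n[i] < n[i-1] for i in range(1, len(n))): scan adjacent pairs for a descent
def pvDescentAux : Char → List Char → Bool
  | _, [] => false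
  | prev, c :: rest => if c < prev then true else pvDescentAux c rest

def pvHasDescent : List Char → Bool
  | [] => false
  | c :: rest => pvDescentAux c rest

def is_number_ok_part2_alt (num : Int) : Bool :=
  let l := (PySem.Int.toStr num).toList
  if pvHasDescent l then false
  else (PySem.Set.ofList l).any (fun c => PySem.List.count l c == 2)

-- ===== PRECONDITION & SPEC =====
def Spec_is_number_ok_part2 (num : Int) (out : Bool) : Prop := out = is_number_ok_part2_alt num
instance (num : Int) (out : Bool) : Decidable (Spec_is_number_ok_part2 num out) := by unfold Spec_is_number_ok_part2; infer_instance

-- ===== CLAIM (what is proved, stated in full; the proofs are below) =====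
def Claim_equal_is_number_ok_part2 : Prop := ∀ (num : Int), Dom_is_number_ok_part2 num → Spec_is_number_ok_part2 num (is_number_ok_part2 num)

-- ===== LEMMAS AND PROOFS =====

-- A's loop minus the early-return and the has_exact_double flag: does the run
-- decomposition of (a current run of prev with multiplicity rc) followed by rest
-- contain a run of length exactly 2?
def pvRunsOK : List Char → Char → Int → Bool
  | [], _, rc => rc == 2
  | c :: rest, prev, rc =>
    if c == prev then pvRunsOK rest prev (rc + 1) else ((rc == 2) || pvRunsOK rest c 1)

theorem pvALoop_eq (rest : List Char) : ∀ (prev : Char) (rc : Int) (hed : Bool),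
    pvALoop rest prev rc hed
      = if pvDescentAux prev rest then false else (hed || pvRunsOK rest prev rc) := by
  induction rest with
  | nil =>
    intro prev rc hed
    simp only [pvALoop, pvDescentAux, pvRunsOK]
    cases h : (rc == 2 : Bool) <;> simp
  | cons c rest ih =>
    intro prev rc hed
    simp only [pvALoop, pvDescentAux, pvRunsOK]
    by_cases hlt : c < prev
    · simp [hlt]
    · by_cases heq : c = prev
      · subst heq
        simp [ih c (rc + 1) hed]
      · have hne : (c == prev) = false := beq_eq_false_iff_ne.mpr heq
        simp only [hlt, if_false, hne, ih c 1]
        cases hd : pvDescentAux c rest <;> cases h2 : (rc == 2 : Bool) <;> simp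

theorem pvDescentAux_le (l : List Char) : ∀ (p : Char), pvDescentAux p l = false →
    ∀ x ∈ l, p ≤ x := by
  induction l with
  | nil => intro p _ x hx; cases hx
  | cons c rest ih =>
    intro p h x hx
    simp only [pvDescentAux] at h
    by_cases hlt : c < p
    · simp [hlt] at h
    · simp only [hlt, if_false] at h
      have hpc : p ≤ c := le_of_not_gt hlt
      rcases List.mem_cons.mp hx with rfl | hx'
      · exact hpc
      · exact le_trans hpc (ih c h x hx')

theorem pvRunsOK_iff (rest : List Char) : ∀ (prev : Char) (rc : Int),
    pvDescentAux prev rest = false →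
    (pvRunsOK rest prev rc = true ↔
      (rc + (rest.count prev : Int) = 2 ∨ ∃ ch, ch ≠ prev ∧ rest.count ch = 2)) := by
  induction rest with
  | nil =>
    intro prev rc _
    simp [pvRunsOK]
  | cons c rest ih =>
    intro prev rc h
    simp only [pvDescentAux] at h
    by_cases hlt : c < prev
    · simp [hlt] at h
    · simp only [hlt, if_false] at h
      by_cases heq : c = prev
      · subst heq
        rw [show pvRunsOK (c :: rest) c rc = pvRunsOK rest c (rc + 1) by simp [pvRunsOK]]
        rw [ih c (rc + 1) h]
        constructor
        · rintro (h1 | ⟨ch, hne, hc⟩)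
          · left; rw [List.count_cons_self]; push_cast; push_cast at h1; omega
          · right; exact ⟨ch, hne, by rw [List.count_cons_of_ne (Ne.symm hne)]; exact hc⟩
        · rintro (h1 | ⟨ch, hne, hc⟩)
          · left; rw [List.count_cons_self] at h1; push_cast at h1 ⊢; omega
          · right; exact ⟨ch, hne, by rwa [List.count_cons_of_ne (Ne.symm hne)] at hc⟩
      · have hbne : (c == prev) = false := beq_eq_false_iff_ne.mpr heq
        have hpc : prev < c := lt_of_le_of_ne (le_of_not_gt hlt) (fun e => heq e.symm)
        have hzero : rest.count prev = 0 := by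
          rw [List.count_eq_zero]
          intro hmem
          exact absurd (pvDescentAux_le rest c h prev hmem) (not_le.mpr hpc)
        have hzc : (c :: rest).count prev = 0 := by
          rw [List.count_cons_of_ne heq]; exact hzero
        rw [show pvRunsOK (c :: rest) prev rc = ((rc == 2) || pvRunsOK rest c 1) by
              simp [pvRunsOK, hbne]]
        rw [Bool.or_eq_true, ih c 1 h, beq_iff_eq]
        constructor
        · rintro (h1 | h2 | ⟨ch, hch, hc⟩)
          · left; rw [hzc]; push_cast; omega
          · right
            exact ⟨c, heq, by rw [List.count_cons_self]; push_cast at h2; omega⟩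
          · right
            refine ⟨ch, fun e => ?_, by rwa [List.count_cons_of_ne (Ne.symm hch)]⟩
            subst e; rw [hzero] at hc; omega
        · rintro (h1 | ⟨ch, hch, hc⟩)
          · left; rw [hzc] at h1; push_cast at h1; omega
          · by_cases hcc : ch = c
            · subst hcc
              rw [List.count_cons_self] at hc
              right; left; push_cast; omega
            · right; right
              refine ⟨ch, hcc, by rwa [List.count_cons_of_ne (Ne.symm hcc)] at hc⟩

-- ===== VERDICT (by name: the statement is the Claim_ definition above) =====
theorem is_number_ok_part2_spec : Claim_equal_is_number_ok_part2 := by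
  intro num _
  unfold Spec_is_number_ok_part2 is_number_ok_part2 is_number_ok_part2_alt
  cases hl : (PySem.Int.toStr num).toList with
  | nil => simp [pvHasDescent]
  | cons c rest =>
    simp only [pvHasDescent]
    rw [pvALoop_eq]
    by_cases hd1 : pvDescentAux c rest = true
    · simp [hd1]
    · have hd : pvDescentAux c rest = false := by simpa using hd1
      simp only [hd, Bool.false_eq_true, if_false, Bool.false_or]
      rw [Bool.eq_iff_iff, pvRunsOK_iff rest c 1 hd, List.any_eq_true]
      constructor
      · rintro (h1 | ⟨ch, hne, hc⟩)
        · refine ⟨c, ?_, ?_⟩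
          · exact (PySem.Set.mem_ofList _ _).mpr (List.mem_cons_self ..)
          · rw [PySem.List.count_eq, beq_iff_eq, List.count_cons_self]
            push_cast at h1; omega
        · have hmem : ch ∈ rest := List.count_pos_iff.mp (by omega)
          refine ⟨ch, (PySem.Set.mem_ofList _ _).mpr (List.mem_cons_of_mem _ hmem), ?_⟩
          rw [PySem.List.count_eq, beq_iff_eq, List.count_cons_of_ne (Ne.symm hne)]
          exact hc
      · rintro ⟨ch, _, hc⟩
        rw [PySem.List.count_eq, beq_iff_eq] at hc
        by_cases hcc : ch = c
        · subst hcc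
          rw [List.count_cons_self] at hc
          left; push_cast; omega
        · right
          refine ⟨ch, hcc, by rwa [List.count_cons_of_ne (Ne.symm hcc)] at hc⟩
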